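-- pv_equiv track=rewrite | github.com/sarahyurick/CSDS-497 | w2v_models.py | set_one_to_one_ids
-- ===== SOURCE A (Python) =====
-- def set_one_to_one_ids(tokens_list):
--     """
--     :param tokens_list: the corpus in list form, after it has been tokenized
--     :return: 2 dicts. first has entries of form {word: id} and second has entries of form {id: word}
--     """
--     lookup_by_word = dict()
--     current_id = 0
--     for token in tokens_list:
--         if token not in lookup_by_word:
--             lookup_by_word.update({token: current_id})
--             current_id += 1
--
--     lookup_by_id = {v: k for k, v in lookup_by_word.items()}
--
--     return lookup_by_word, lookup_by_id
-- ===== SOURCE B (Python) =====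
-- def set_one_to_one_ids(tokens_list):
--     # Record each token's FIRST-occurrence index by scanning backwards (later,
--     # i.e. earlier-index, writes overwrite), then sort the distinct tokens by
--     # that index; the rank in the sorted order is the token's id.
--     first = {}
--     for i in range(len(tokens_list) - 1, -1, -1):
--         first[tokens_list[i]] = i
--     order = sorted(first, key=first.get)
--     lookup_by_word = dict(zip(order, range(len(order))))
--     lookup_by_id = dict(zip(range(len(order)), order))
--     return lookup_by_word, lookup_by_id
-- ===== Notes on version B (the rewrite author's own statement) =====
-- stated objective: alternative
-- what changed: Replaces A's guarded-accumulator loop (membership test + running id counter) with a different algorithm: a backward overwrite scan records each token's first-occurrence index, the distinct tokens are sorted by that index, and both dicts are built by zipping the sorted order with ranks.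
import Mathlib
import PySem

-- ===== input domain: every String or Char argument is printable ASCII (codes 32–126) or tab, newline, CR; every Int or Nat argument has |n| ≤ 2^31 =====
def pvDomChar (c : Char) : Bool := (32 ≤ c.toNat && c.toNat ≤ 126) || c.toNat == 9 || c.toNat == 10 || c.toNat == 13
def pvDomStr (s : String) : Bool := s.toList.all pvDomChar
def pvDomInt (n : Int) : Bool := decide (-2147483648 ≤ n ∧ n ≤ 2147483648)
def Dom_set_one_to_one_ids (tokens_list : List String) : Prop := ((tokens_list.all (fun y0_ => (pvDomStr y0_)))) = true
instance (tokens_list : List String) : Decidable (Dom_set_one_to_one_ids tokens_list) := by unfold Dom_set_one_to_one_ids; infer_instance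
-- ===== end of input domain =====

-- B records each token's first-occurrence index by a backward overwrite scan and sorts the
-- distinct tokens by that index, replacing A's guarded-accumulator loop (alternative; same result).

-- ===== PORT A =====
-- the body of A's for-loop: conditional insert with a running id counter
def pvStepA (st : PySem.Dict String Int × Int) (token : String) : PySem.Dict String Int × Int :=
  if st.1.contains token then st else (st.1.insert token st.2, st.2 + 1)

def set_one_to_one_ids (tokens_list : List String) : (List (String × Int)) × (List (Int × String)) :=
  let st := tokens_list.foldl pvStepA (PySem.Dict.empty, 0)
  let lookup_by_word := st.1
  -- {v: k for k, v in lookup_by_word.items()}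
  let lookup_by_id : PySem.Dict Int String := PySem.Dict.ofList (lookup_by_word.items.map (fun kv => (kv.2, kv.1)))
  (lookup_by_word.items, lookup_by_id.items)

-- ===== PORT B =====
def set_one_to_one_ids_alt (tokens_list : List String) : (List (String × Int)) × (List (Int × String)) :=
  -- for i in range(len(tokens_list) - 1, -1, -1): first[tokens_list[i]] = i
  -- (i is always a valid index, so pyGetD's default "" is never consulted)
  let first : PySem.Dict String Int :=
    (PySem.List.pyRange ((tokens_list.length : Int) - 1) (-1) (-1)).foldl
      (fun d i => d.insert (PySem.List.pyGetD tokens_list i "") i) PySem.Dict.empty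
  -- order = sorted(first, key=first.get); every key is present in first, so get = getD _ 0
  let order := PySem.List.sorted first.keys (fun k => first.getD k 0)
  -- lookup_by_word = dict(zip(order, range(len(order))))
  let lookup_by_word : PySem.Dict String Int :=
    PySem.Dict.ofList (order.zip (PySem.List.pyRange 0 (order.length : Int)))
  -- lookup_by_id = dict(zip(range(len(order)), order))
  let lookup_by_id : PySem.Dict Int String :=
    PySem.Dict.ofList ((PySem.List.pyRange 0 (order.length : Int)).zip order)
  (lookup_by_word.items, lookup_by_id.items)

-- ===== PRECONDITION & SPEC =====
def Spec_set_one_to_one_ids (tokens_list : List String) (out : (List (String × Int)) × (List (Int × String))) : Prop := out = set_one_to_one_ids_alt tokens_list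
instance (tokens_list : List String) (out : (List (String × Int)) × (List (Int × String))) : Decidable (Spec_set_one_to_one_ids tokens_list out) := by unfold Spec_set_one_to_one_ids; infer_instance

-- ===== CLAIM (what is proved, stated in full; the proofs are below) =====
def Claim_equal_set_one_to_one_ids : Prop := ∀ (tokens_list : List String), Dom_set_one_to_one_ids tokens_list → Spec_set_one_to_one_ids tokens_list (set_one_to_one_ids tokens_list)

-- ===== LEMMAS AND PROOFS =====

-- ---- A side: the dict A's loop maintains, characterised by its distinct-keys-so-far list s
def pvW (s : List String) : PySem.Dict String Int :=
  PySem.Dict.mk ((PySem.List.enumerate s 0).map (fun p => (p.2, p.1)))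

theorem pvW_keys (s : List String) : (pvW s).keys = s := by
  simp [pvW, PySem.Dict.keys, List.map_map, Function.comp_def]

theorem pvStepA_eq (s : List String) (t : String) :
    pvStepA (pvW s, (s.length : Int)) t = (pvW (PySem.Set.add s t), ((PySem.Set.add s t).length : Int)) := by
  by_cases h : t ∈ s
  · have hc : (pvW s).contains t = true := by
      rw [PySem.Dict.contains_eq_decide_mem_keys, pvW_keys]; simpa
    simp [pvStepA, hc, PySem.Set.add, h]
  · have hc : (pvW s).contains t = false := by
      rw [PySem.Dict.contains_eq_decide_mem_keys, pvW_keys]; simpa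
    have hadd : PySem.Set.add s t = s ++ [t] := by
      simp [PySem.Set.add, h]
    simp only [pvStepA, hc, Bool.false_eq_true, if_false, hadd, Prod.mk.injEq]
    constructor
    · apply PySem.Dict.ext
      rw [PySem.Dict.items_insert_of_not_contains _ _ hc]
      simp [pvW, PySem.List.enumerate_append, PySem.List.enumerate_cons, PySem.List.enumerate_nil]
    · simp

theorem pvLoopA (l : List String) : ∀ (s : List String),
    l.foldl pvStepA (pvW s, (s.length : Int)) =
      (pvW (PySem.Set.update s l), ((PySem.Set.update s l).length : Int)) := by
  induction l with
  | nil => intro s; simp [PySem.Set.update]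
  | cons t l ih =>
      intro s
      rw [List.foldl_cons, pvStepA_eq]
      simpa [PySem.Set.update] using ih (PySem.Set.add s t)

-- a dict built from a list of pairs with distinct keys has exactly that items list
theorem pv_items_ofList {κ ν : Type} [BEq κ] [LawfulBEq κ] (l : List (κ × ν))
    (hnd : (l.map Prod.fst).Nodup) : (PySem.Dict.ofList l).items = l := by
  have := PySem.Dict.items_foldl_insert_fresh (l := l) (k := Prod.fst) (v := Prod.snd)
    (d := PySem.Dict.empty) (by intro a _; simp [PySem.Dict.contains_empty]) hnd
  simpa [PySem.Dict.ofList] using this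

theorem pvA_items (tokens_list : List String) :
    (tokens_list.foldl pvStepA (PySem.Dict.empty, 0)).1.items =
      (PySem.List.enumerate (PySem.List.dedup tokens_list) 0).map (fun p => (p.2, p.1)) := by
  have h0 : (PySem.Dict.empty : PySem.Dict String Int) = pvW [] := by
    apply PySem.Dict.ext; simp [pvW, PySem.List.enumerate_nil, PySem.Dict.empty]
  have : tokens_list.foldl pvStepA (PySem.Dict.empty, 0) =
      (pvW (PySem.Set.update [] tokens_list), ((PySem.Set.update [] tokens_list).length : Int)) := by
    rw [h0]
    simpa using pvLoopA tokens_list []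
  rw [this]
  have hupd : PySem.Set.update [] tokens_list = PySem.List.dedup tokens_list := by
    simp [PySem.Set.update, PySem.List.dedup_eq_ofList, PySem.Set.ofList_eq_foldl]
  rw [hupd]; rfl

-- ---- B side: the descending index range, in closed form
theorem pvRangeDown (m : Nat) :
    PySem.List.pyRange ((m : Int) - 1) (-1) (-1) =
      (List.range m).map (fun k : Nat => (m : Int) - 1 - (k : Int)) := by
  unfold PySem.List.pyRange
  rw [if_neg (by norm_num), if_neg (by norm_num)]
  rcases Nat.eq_zero_or_pos m with h | h
  · subst h; rw [if_neg (by norm_num)]; simp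
  · rw [if_pos (by omega : (-1:Int) < (m:Int) - 1)]
    have h2 : (((m:Int) - 1 - -1 + - -1 - 1) / - -1).toNat = m := by
      norm_num
    simp only [h2]
    apply List.map_congr_left
    intro k _; ring

theorem pvRangeDown_succ (m : Nat) :
    PySem.List.pyRange (((m + 1 : Nat) : Int) - 1) (-1) (-1) =
      (m : Int) :: PySem.List.pyRange ((m : Int) - 1) (-1) (-1) := by
  rw [pvRangeDown, pvRangeDown, List.range_succ_eq_map]
  simp only [List.map_cons, List.map_map, Function.comp_def]
  refine List.cons_eq_cons.mpr ⟨?_, ?_⟩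
  · push_cast; ring
  · apply List.map_congr_left
    intro k _; push_cast; ring

theorem pvFirstInv (tokens_list : List String) (m : Nat) (hm : m ≤ tokens_list.length) :
    ∀ (d : PySem.Dict String Int) (t : String) (d0 : Int),
    ((PySem.List.pyRange ((m : Int) - 1) (-1) (-1)).foldl
        (fun d i => d.insert (PySem.List.pyGetD tokens_list i "") i) d).getD t d0 =
      if t ∈ tokens_list.take m then (tokens_list.idxOf t : Int) else d.getD t d0 := by
  induction m with
  | zero =>
      intro d t d0
      rw [pvRangeDown]
      simp
  | succ m ih =>
      intro d t d0
      have hmlt : m < tokens_list.length := by omega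
      rw [pvRangeDown_succ, List.foldl_cons]
      rw [ih (by omega)]
      have hget : PySem.List.pyGetD tokens_list (m : Int) "" = tokens_list[m] := by
        rw [PySem.List.pyGetD_natCast, List.getD_eq_getElem _ _ hmlt]
      have htake : tokens_list.take (m+1) = tokens_list.take m ++ [tokens_list[m]] := by
        rw [List.take_add_one, List.getElem?_eq_getElem hmlt]; rfl
      by_cases h1 : t ∈ tokens_list.take m
      · rw [if_pos h1, if_pos (by rw [htake]; exact List.mem_append_left _ h1)]
      · rw [if_neg h1, PySem.Dict.getD_insert, hget]
        by_cases h2 : t = tokens_list[m]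
        · rw [if_pos h2, if_pos (by rw [htake, h2]; exact List.mem_append_right _ (List.mem_singleton_self _))]
          have hdrop : tokens_list.drop m = tokens_list[m] :: tokens_list.drop (m+1) :=
            List.drop_eq_getElem_cons hmlt
          have hidx : List.idxOf t tokens_list = m := by
            conv_lhs => rw [show tokens_list = tokens_list.take m ++ tokens_list.drop m from
              (List.take_append_drop m tokens_list).symm]
            rw [List.idxOf_append, if_neg h1, hdrop, ← h2, List.idxOf_cons_self, List.length_take]
            omega
          rw [hidx]
        · rw [if_neg h2, if_neg (by rw [htake]; intro hmem; rcases List.mem_append.mp hmem with hx | hx; exacts [h1 hx, h2 (List.mem_singleton.mp hx)])]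

theorem pvDownMap (tokens_list : List String) :
    (PySem.List.pyRange ((tokens_list.length : Int) - 1) (-1) (-1)).map
        (fun i => PySem.List.pyGetD tokens_list i "") = tokens_list.reverse := by
  rw [pvRangeDown, List.map_map]
  apply List.ext_getElem
  · simp
  · intro i h1 h2
    simp only [List.length_map, List.length_range] at h1
    simp only [List.getElem_map, List.getElem_range, Function.comp_def]
    have hc : ((tokens_list.length : Int) - 1 - (i : Int)) = ((tokens_list.length - 1 - i : Nat) : Int) := by
      omega
    rw [hc, PySem.List.pyGetD_natCast, List.getElem_reverse,
      List.getD_eq_getElem _ _ (by omega)]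

theorem pvDedupPairwise {α : Type} [BEq α] [LawfulBEq α] (xs : List α) :
    (PySem.List.dedup xs).Pairwise (fun a b => xs.idxOf a < xs.idxOf b) := by
  induction xs using List.reverseRecOn with
  | nil => simp [PySem.List.dedup_eq_ofList, PySem.Set.ofList_eq_foldl]
  | append_singleton xs x ih =>
      have hfold : PySem.List.dedup (xs ++ [x]) = PySem.Set.add (PySem.List.dedup xs) x := by
        simp [PySem.List.dedup_eq_ofList, PySem.Set.ofList_eq_foldl]
      have hmemd : ∀ a, a ∈ PySem.List.dedup xs → a ∈ xs := fun a ha =>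
        (PySem.List.mem_dedup xs a).mp ha
      have hlift : (PySem.List.dedup xs).Pairwise
          (fun a b => (xs ++ [x]).idxOf a < (xs ++ [x]).idxOf b) := by
        refine ih.imp_of_mem ?_
        intro a b ha hb hab
        rw [List.idxOf_append, List.idxOf_append, if_pos (hmemd a ha), if_pos (hmemd b hb)]
        exact hab
      by_cases hx : x ∈ xs
      · have : PySem.Set.add (PySem.List.dedup xs) x = PySem.List.dedup xs := by
          simp [PySem.Set.add, PySem.Set.contains, hx]
        rw [hfold, this]
        exact hlift
      · have : PySem.Set.add (PySem.List.dedup xs) x = PySem.List.dedup xs ++ [x] := by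
          simp [PySem.Set.add, PySem.Set.contains, hx]
        rw [hfold, this, List.pairwise_append]
        refine ⟨hlift, List.pairwise_singleton _ _, ?_⟩
        intro a ha b hb
        rw [List.mem_singleton] at hb; subst hb
        rw [List.idxOf_append, List.idxOf_append, if_pos (hmemd a ha), if_neg hx,
          List.idxOf_cons_self]
        have := List.idxOf_lt_length_of_mem (hmemd a ha)
        omega

theorem pvOrder (tokens_list : List String) :
    (PySem.List.sorted
      ((PySem.List.pyRange ((tokens_list.length : Int) - 1) (-1) (-1)).foldl
          (fun d i => d.insert (PySem.List.pyGetD tokens_list i "") i) PySem.Dict.empty).keys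
      (fun k =>
        ((PySem.List.pyRange ((tokens_list.length : Int) - 1) (-1) (-1)).foldl
            (fun d i => d.insert (PySem.List.pyGetD tokens_list i "") i) PySem.Dict.empty).getD k 0)) =
      PySem.List.dedup tokens_list := by
  set F := (PySem.List.pyRange ((tokens_list.length : Int) - 1) (-1) (-1)).foldl
      (fun d i => d.insert (PySem.List.pyGetD tokens_list i "") i) PySem.Dict.empty with hF
  have hkeys : F.keys = PySem.Set.ofList tokens_list.reverse := by
    rw [hF, PySem.Dict.keys_foldl_insert_key _ (fun i => PySem.List.pyGetD tokens_list i "")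
      (fun _ i => i), PySem.Dict.keys_empty, pvDownMap]
    simp [PySem.Set.update, PySem.Set.ofList_eq_foldl]
  have hmemK : ∀ t, t ∈ F.keys ↔ t ∈ tokens_list := by
    intro t; rw [hkeys, PySem.Set.mem_ofList, List.mem_reverse]
  have hnodK : F.keys.Nodup := by
    rw [hF]
    exact PySem.Dict.nodup_keys_foldl_insert_key _ _ _ _ (by simp)
  have hgetD : ∀ t ∈ tokens_list, F.getD t 0 = (tokens_list.idxOf t : Int) := by
    intro t ht
    rw [hF, pvFirstInv tokens_list tokens_list.length le_rfl, List.take_length, if_pos ht]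
  apply PySem.List.sorted_eq_of_perm_of_pairwise_lt
  · rw [(List.perm_ext_iff_of_nodup (PySem.List.nodup_dedup tokens_list) hnodK)]
    intro a; rw [hmemK, PySem.List.mem_dedup]
  · refine (pvDedupPairwise tokens_list).imp_of_mem ?_
    intro a b ha hb hab
    have ha' := (PySem.List.mem_dedup tokens_list a).mp ha
    have hb' := (PySem.List.mem_dedup tokens_list b).mp hb
    rw [hgetD a ha', hgetD b hb']
    exact_mod_cast hab

theorem pvZipRange {α : Type} (xs : List α) : ∀ (s : Int),
    xs.zip (PySem.List.pyRange s (s + (xs.length : Int))) =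
      (PySem.List.enumerate xs s).map (fun p => (p.2, p.1)) := by
  induction xs with
  | nil => intro s; simp
  | cons x xs ih =>
      intro s
      rw [PySem.List.pyRange_one_cons (by simp only [List.length_cons]; push_cast; omega)]
      rw [PySem.List.enumerate_cons]
      simp only [List.zip_cons_cons, List.map_cons]
      congr 1
      have harg : s + ((x :: xs).length : Int) = (s + 1) + (xs.length : Int) := by
        simp only [List.length_cons]; push_cast; ring
      rw [harg, ih (s + 1)]

theorem pvRangeZip {α : Type} (xs : List α) : ∀ (s : Int),
    (PySem.List.pyRange s (s + (xs.length : Int))).zip xs = PySem.List.enumerate xs s := by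
  induction xs with
  | nil => intro s; simp
  | cons x xs ih =>
      intro s
      rw [PySem.List.pyRange_one_cons (by simp only [List.length_cons]; push_cast; omega)]
      rw [PySem.List.enumerate_cons]
      simp only [List.zip_cons_cons]
      congr 1
      have harg : s + ((x :: xs).length : Int) = (s + 1) + (xs.length : Int) := by
        simp only [List.length_cons]; push_cast; ring
      rw [harg, ih (s + 1)]

-- ===== VERDICT (by name: the statement is the Claim_ definition above) =====
theorem set_one_to_one_ids_spec : Claim_equal_set_one_to_one_ids := by
  intro tokens_list _
  unfold Spec_set_one_to_one_ids set_one_to_one_ids set_one_to_one_ids_alt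
  simp only [pvA_items, pvOrder]
  have hu := PySem.List.nodup_dedup (xs := tokens_list)
  set E := PySem.List.enumerate (PySem.List.dedup tokens_list) 0 with hE
  have hlen : ((PySem.List.dedup tokens_list).length : Int) =
      0 + ((PySem.List.dedup tokens_list).length : Int) := by omega
  have hz1 : (PySem.List.dedup tokens_list).zip
      (PySem.List.pyRange 0 ((PySem.List.dedup tokens_list).length : Int)) =
      E.map (fun p => (p.2, p.1)) := by
    rw [hlen]; exact pvZipRange _ 0
  have hz2 : (PySem.List.pyRange 0 ((PySem.List.dedup tokens_list).length : Int)).zip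
      (PySem.List.dedup tokens_list) = E := by
    rw [hlen]; exact pvRangeZip _ 0
  rw [hz1, hz2]
  have hsnd : (E.map (fun p => (p.2, p.1))).map Prod.fst = PySem.List.dedup tokens_list := by
    simp [hE, List.map_map, Function.comp_def]
  simp only [Prod.mk.injEq]
  constructor
  · exact (pv_items_ofList _ (by rw [hsnd]; exact hu)).symm
  · congr 1
    simp [List.map_map, Function.comp_def]
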